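-- pv_equiv track=rewrite | github.com/ilgrisha/CornStructor | backend/app/core/primer/offtarget.py | _count_ungapped_matches
-- ===== SOURCE A (Python) =====
-- def _count_ungapped_matches(primer: str, subject: str, max_mismatches: int) -> int:
--     p = primer.upper()
--     s = subject.upper()
--     n = len(p)
--     if n == 0 or len(s) < 1:
--         return 0
--     count = 0
--     for start in range(0, len(s) - n + 1):
--         window = s[start : start + n]
--         mism = sum(1 for i in range(n) if p[i] != window[i])
--         if mism <= max_mismatches:
--             count += 1
--     return count
-- ===== SOURCE B (Python) =====
-- def _count_ungapped_matches(primer: str, subject: str, max_mismatches: int) -> int: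
--     # Transposed traversal: instead of rescanning each window, sweep the primer
--     # positions once and accumulate a per-window mismatch vector, then threshold.
--     p = primer.upper()
--     s = subject.upper()
--     n = len(p)
--     m = len(s)
--     if n == 0 or m == 0 or m < n:
--         return 0
--     w = m - n + 1
--     mism = [0] * w
--     for i in range(n):
--         c = p[i]
--         mism = [acc + (c != ch) for acc, ch in zip(mism, s[i : i + w])]
--     return sum(1 for x in mism if x <= max_mismatches)
-- ===== Notes on version B (the rewrite author's own statement) =====
-- stated objective: alternative
-- what changed: Transposes the traversal: instead of slicing each window and recounting its n mismatches, B sweeps the primer positions once, accumulating a per-window mismatch vector (column-wise zip update), and thresholds that vector at the end.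
import Mathlib
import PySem

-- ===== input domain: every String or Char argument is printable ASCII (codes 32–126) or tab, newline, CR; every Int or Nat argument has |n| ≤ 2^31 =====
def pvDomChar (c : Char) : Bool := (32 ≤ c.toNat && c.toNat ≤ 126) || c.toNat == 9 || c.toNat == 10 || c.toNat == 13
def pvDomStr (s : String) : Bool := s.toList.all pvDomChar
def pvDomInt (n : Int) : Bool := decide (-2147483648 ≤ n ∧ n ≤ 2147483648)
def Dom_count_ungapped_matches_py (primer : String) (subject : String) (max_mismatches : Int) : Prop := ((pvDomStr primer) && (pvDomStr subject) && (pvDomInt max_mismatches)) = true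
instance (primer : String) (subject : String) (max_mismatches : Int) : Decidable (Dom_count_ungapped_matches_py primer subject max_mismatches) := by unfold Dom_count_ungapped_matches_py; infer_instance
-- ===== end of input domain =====

-- B transposes the traversal: one sweep over the primer positions updates a per-window mismatch vector, then thresholds it (alternative algorithm, same cost class).
-- ===== PORT A =====
def count_ungapped_matches_py (primer : String) (subject : String) (max_mismatches : Int) : Int :=
  let p := (PySem.Str.upper primer).toList
  let s := (PySem.Str.upper subject).toList
  let n : Int := PySem.List.len p
  if n = 0 ∨ PySem.List.len s < 1 then 0
  else
    (PySem.List.pyRange 0 (PySem.List.len s - n + 1) 1).foldl (fun count start =>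
      let window := PySem.List.slice s (some start) (some (start + n))
      let mism : Int := (PySem.List.pyRange 0 n 1).foldl (fun acc i =>
        if PySem.List.pyGet? p i ≠ PySem.List.pyGet? window i then acc + 1 else acc) 0
      if mism ≤ max_mismatches then count + 1 else count) 0

-- ===== PORT B =====
def count_ungapped_matches_py_alt (primer : String) (subject : String) (max_mismatches : Int) : Int :=
  let p := (PySem.Str.upper primer).toList
  let s := (PySem.Str.upper subject).toList
  let n : Int := PySem.List.len p
  let m : Int := PySem.List.len s
  if n = 0 ∨ m = 0 ∨ m < n then 0
  else
    let w : Int := m - n + 1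
    let mism : List Int :=
      (PySem.List.pyRange 0 n 1).foldl (fun mism i =>
        let c := PySem.List.pyGetD p i ' '  -- p[i]; exact here: 0 ≤ i < n always holds
        (mism.zip (PySem.List.slice s (some i) (some (i + w)))).map
          (fun q => q.1 + (if c ≠ q.2 then 1 else 0)))
        (PySem.List.pyRepeat [0] w)
    mism.foldl (fun acc x => if x ≤ max_mismatches then acc + 1 else acc) 0

-- ===== PRECONDITION & SPEC =====
def Spec_count_ungapped_matches_py (primer : String) (subject : String) (max_mismatches : Int) (out : Int) : Prop := out = count_ungapped_matches_py_alt primer subject max_mismatches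
instance (primer : String) (subject : String) (max_mismatches : Int) (out : Int) : Decidable (Spec_count_ungapped_matches_py primer subject max_mismatches out) := by unfold Spec_count_ungapped_matches_py; infer_instance

-- ===== CLAIM (what is proved, stated in full; the proofs are below) =====
def Claim_equal_count_ungapped_matches_py : Prop := ∀ (primer : String) (subject : String) (max_mismatches : Int), Dom_count_ungapped_matches_py primer subject max_mismatches → Spec_count_ungapped_matches_py primer subject max_mismatches (count_ungapped_matches_py primer subject max_mismatches)

-- ===== LEMMAS AND PROOFS =====
def pvKey (p : List Char) (i : Int) : Char := PySem.List.pyGetD p i ' '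

-- mismatch count of the window at offset d
def pvMM (p s : List Char) (d : Int) : Nat :=
  (PySem.List.pyRange 0 (p.length : Int) 1).countP (fun i => !(pvKey p i == pvKey s (d + i)))

-- A's inner loop computes the mismatch count of window `start`
lemma pv_mism (p s : List Char) (start : Int) (h0 : 0 ≤ start)
    (hm : start + (p.length : Int) ≤ (s.length : Int)) :
    ((PySem.List.pyRange 0 (p.length : Int) 1).foldl (fun acc i =>
      if PySem.List.pyGet? p i ≠ PySem.List.pyGet? (PySem.List.slice s (some start) (some (start + (p.length : Int)))) i
      then acc + 1 else acc) 0 : Int)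
    = (pvMM p s start : Int) := by
  rw [PySem.List.foldl_ite_add_one, zero_add]
  unfold pvMM
  congr 1
  apply List.countP_congr
  intro i hi
  rw [PySem.List.mem_pyRange_one] at hi
  have hi1 : i < (p.length : Int) := hi.2
  have hsi : (start + i).toNat < s.length := by omega
  have hp : PySem.List.pyGet? p i = some p[i.toNat] :=
    PySem.List.pyGet?_eq_some_getElem _ hi.1 hi1
  have hwin : PySem.List.pyGet? (PySem.List.slice s (some start) (some (start + (p.length : Int)))) i
      = some (s[(start + i).toNat]'hsi) := by
    rw [PySem.List.slice_toNat _ h0 (by omega)]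
    rw [PySem.List.pyGet?_of_nonneg _ hi.1]
    rw [List.getElem?_take_of_lt (by omega)]
    rw [List.getElem?_drop]
    have hidx : start.toNat + i.toNat = (start + i).toNat := by omega
    rw [hidx]
    rw [List.getElem?_eq_getElem hsi]
  have hkp : pvKey p i = p[i.toNat] := PySem.List.pyGetD_eq_getElem _ _ hi.1 hi1
  have hks : pvKey s (start + i) = s[(start + i).toNat]'hsi :=
    PySem.List.pyGetD_eq_getElem _ _ (by omega) (by omega)
  rw [hp, hwin, hkp, hks]
  rcases eq_or_ne (p[i.toNat]) (s[(start + i).toNat]'hsi) with h | h <;> simp [h]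

-- one column step of B: length and pointwise value
lemma pv_step_len (s : List Char) (arr : List Int) (c : Char) (i w : Int)
    (hi : 0 ≤ i) (hw : 0 ≤ w) (hiw : i + w ≤ (s.length : Int))
    (hlen : (arr.length : Int) = w) :
    (((arr.zip (PySem.List.slice s (some i) (some (i + w)))).map
      (fun q => q.1 + (if c ≠ q.2 then 1 else 0))).length : Int) = w := by
  rw [List.length_map, List.length_zip]
  rw [PySem.List.slice_toNat _ hi (by omega)]
  rw [List.length_take, List.length_drop]
  omega

lemma pv_step_getD (s : List Char) (arr : List Int) (c : Char) (i w d : Int)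
    (hi : 0 ≤ i) (hiw : i + w ≤ (s.length : Int))
    (hlen : (arr.length : Int) = w) (hd0 : 0 ≤ d) (hdw : d < w) :
    PySem.List.pyGetD ((arr.zip (PySem.List.slice s (some i) (some (i + w)))).map
      (fun q => q.1 + (if c ≠ q.2 then 1 else 0))) d 0
    = PySem.List.pyGetD arr d 0 + (if c ≠ pvKey s (d + i) then 1 else 0) := by
  have hw : 0 ≤ w := by omega
  have hL : (((arr.zip (PySem.List.slice s (some i) (some (i + w)))).map
      (fun q => q.1 + (if c ≠ q.2 then 1 else 0))).length : Int) = w :=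
    pv_step_len s arr c i w hi hw hiw hlen
  rw [PySem.List.pyGetD_eq_getElem _ _ hd0 (by omega)]
  rw [List.getElem_map, List.getElem_zip]
  have hsl : (PySem.List.slice s (some i) (some (i + w))) = (s.drop i.toNat).take ((i + w).toNat - i.toNat) :=
    PySem.List.slice_toNat _ hi (by omega)
  have hdi : (d + i).toNat < s.length := by omega
  have hval : (PySem.List.slice s (some i) (some (i + w)))[d.toNat]'(by
      rw [hsl, List.length_take, List.length_drop]; omega) = s[(d + i).toNat]'hdi := by
    simp only [hsl]
    rw [List.getElem_take, List.getElem_drop]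
    congr 1
    omega
  rw [hval]
  rw [PySem.List.pyGetD_eq_getElem _ _ hd0 (by omega)]
  have hks : pvKey s (d + i) = s[(d + i).toNat]'hdi :=
    PySem.List.pyGetD_eq_getElem _ _ (by omega) (by omega)
  rw [hks]

-- the column sweep: length stays w and entry d accumulates the mismatch count
lemma pv_col (p s : List Char) (w : Int) (hw : 0 < w)
    (hws : w = (s.length : Int) - (p.length : Int) + 1)
    (t : Nat) (ht : (t : Int) ≤ (p.length : Int)) :
    (((PySem.List.pyRange 0 (t : Int) 1).foldl (fun mism i =>
        (mism.zip (PySem.List.slice s (some i) (some (i + w)))).map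
          (fun q => q.1 + (if PySem.List.pyGetD p i ' ' ≠ q.2 then 1 else 0)))
        (PySem.List.pyRepeat ([0] : List Int) w)).length : Int) = w
    ∧ (∀ d : Int, 0 ≤ d → d < w →
      PySem.List.pyGetD ((PySem.List.pyRange 0 (t : Int) 1).foldl (fun mism i =>
        (mism.zip (PySem.List.slice s (some i) (some (i + w)))).map
          (fun q => q.1 + (if PySem.List.pyGetD p i ' ' ≠ q.2 then 1 else 0)))
        (PySem.List.pyRepeat ([0] : List Int) w)) d 0
      = ((PySem.List.pyRange 0 (t : Int) 1).countP (fun i => !(pvKey p i == pvKey s (d + i))) : Int)) := by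
  induction t with
  | zero =>
    rw [show ((0 : Nat) : Int) = 0 from rfl, PySem.List.pyRange_one_eq_nil le_rfl]
    simp only [List.foldl_nil, List.countP_nil]
    constructor
    · rw [PySem.List.pyRepeat_singleton, List.length_replicate]; omega
    · intro d hd0 hdw
      rw [PySem.List.pyRepeat_singleton,
          PySem.List.pyGetD_eq_getElem _ 0 hd0 (by rw [List.length_replicate]; omega),
          List.getElem_replicate]
      simp
  | succ t ih =>
    have ht' : (t : Int) ≤ (p.length : Int) := by push_cast at ht ⊢; omega
    obtain ⟨ihlen, ihval⟩ := ih ht'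
    have hsplit : PySem.List.pyRange 0 ((t + 1 : Nat) : Int) 1
        = PySem.List.pyRange 0 (t : Int) 1 ++ [(t : Int)] := by
      rw [show ((t + 1 : Nat) : Int) = (t : Int) + 1 by push_cast; ring,
          PySem.List.pyRange_one_succ_right (by positivity)]
    have hiw : (t : Int) + w ≤ (s.length : Int) := by omega
    constructor
    · rw [hsplit, List.foldl_append, List.foldl_cons, List.foldl_nil]
      exact pv_step_len s _ _ _ w (by positivity) (by omega) hiw ihlen
    · intro d hd0 hdw
      rw [hsplit, List.foldl_append, List.foldl_cons, List.foldl_nil, List.countP_append]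
      rw [pv_step_getD s _ _ _ w d (by positivity) hiw ihlen hd0 hdw]
      rw [ihval d hd0 hdw]
      have hsingle : List.countP (fun i => !(pvKey p i == pvKey s (d + i))) [(t : Int)]
          = if pvKey p (t : Int) ≠ pvKey s (d + (t : Int)) then 1 else 0 := by
        rw [List.countP_cons, List.countP_nil]
        rcases eq_or_ne (pvKey p (t : Int)) (pvKey s (d + (t : Int))) with h | h <;> simp [h]
      rw [hsingle]
      have hc : PySem.List.pyGetD p (t : Int) ' ' = pvKey p (t : Int) := rfl
      rw [hc]
      rcases eq_or_ne (pvKey p (t : Int)) (pvKey s (d + (t : Int))) with h | h <;> simp [h]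

theorem pv_main (primer subject : String) (max_mismatches : Int) :
    count_ungapped_matches_py primer subject max_mismatches
    = count_ungapped_matches_py_alt primer subject max_mismatches := by
  unfold count_ungapped_matches_py count_ungapped_matches_py_alt
  dsimp only
  by_cases hn0 : ((PySem.Str.upper primer).toList.length : Int) = 0
  · have cA : PySem.List.len (PySem.Str.upper primer).toList = 0 ∨ PySem.List.len (PySem.Str.upper subject).toList < 1 :=
      Or.inl (by rw [PySem.List.len_eq]; exact hn0)
    have cB : PySem.List.len (PySem.Str.upper primer).toList = 0 ∨ PySem.List.len (PySem.Str.upper subject).toList = 0 ∨ PySem.List.len (PySem.Str.upper subject).toList < PySem.List.len (PySem.Str.upper primer).toList :=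
      Or.inl (by rw [PySem.List.len_eq]; exact hn0)
    rw [if_pos cA, if_pos cB]
  by_cases hm0 : ((PySem.Str.upper subject).toList.length : Int) = 0
  · have cA : PySem.List.len (PySem.Str.upper primer).toList = 0 ∨ PySem.List.len (PySem.Str.upper subject).toList < 1 :=
      Or.inr (by rw [PySem.List.len_eq]; omega)
    have cB : PySem.List.len (PySem.Str.upper primer).toList = 0 ∨ PySem.List.len (PySem.Str.upper subject).toList = 0 ∨ PySem.List.len (PySem.Str.upper subject).toList < PySem.List.len (PySem.Str.upper primer).toList :=
      Or.inr (Or.inl (by rw [PySem.List.len_eq]; exact hm0))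
    rw [if_pos cA, if_pos cB]
  by_cases hmn : ((PySem.Str.upper subject).toList.length : Int) < ((PySem.Str.upper primer).toList.length : Int)
  · have cA : ¬ (PySem.List.len (PySem.Str.upper primer).toList = 0 ∨ PySem.List.len (PySem.Str.upper subject).toList < 1) := by
      rw [PySem.List.len_eq, PySem.List.len_eq]; omega
    have cB : PySem.List.len (PySem.Str.upper primer).toList = 0 ∨ PySem.List.len (PySem.Str.upper subject).toList = 0 ∨ PySem.List.len (PySem.Str.upper subject).toList < PySem.List.len (PySem.Str.upper primer).toList :=
      Or.inr (Or.inr (by rw [PySem.List.len_eq, PySem.List.len_eq]; exact hmn))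
    rw [if_neg cA, if_pos cB]
    rw [show PySem.List.pyRange 0 (PySem.List.len (PySem.Str.upper subject).toList - PySem.List.len (PySem.Str.upper primer).toList + 1) 1 = ([] : List Int) from
      PySem.List.pyRange_one_eq_nil (by rw [PySem.List.len_eq, PySem.List.len_eq]; omega)]
    rw [List.foldl_nil]
  · have cA : ¬ (PySem.List.len (PySem.Str.upper primer).toList = 0 ∨ PySem.List.len (PySem.Str.upper subject).toList < 1) := by
      rw [PySem.List.len_eq, PySem.List.len_eq]; omega
    have cB : ¬ (PySem.List.len (PySem.Str.upper primer).toList = 0 ∨ PySem.List.len (PySem.Str.upper subject).toList = 0 ∨ PySem.List.len (PySem.Str.upper subject).toList < PySem.List.len (PySem.Str.upper primer).toList) := by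
      rw [PySem.List.len_eq, PySem.List.len_eq]; omega
    rw [if_neg cA, if_neg cB]
    set P := (PySem.Str.upper primer).toList with hP
    set S := (PySem.Str.upper subject).toList with hS
    set w := PySem.List.len S - PySem.List.len P + 1 with hw
    set M := (PySem.List.pyRange 0 (PySem.List.len P) 1).foldl (fun mism i =>
        (mism.zip (PySem.List.slice S (some i) (some (i + w)))).map
          (fun q => q.1 + (if PySem.List.pyGetD P i ' ' ≠ q.2 then 1 else 0)))
        (PySem.List.pyRepeat ([0] : List Int) w) with hM
    have hw' : w = (S.length : Int) - (P.length : Int) + 1 := by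
      rw [hw, PySem.List.len_eq, PySem.List.len_eq]
    have hwpos : 0 < w := by omega
    have hn' : PySem.List.pyRange 0 (PySem.List.len P) 1 = PySem.List.pyRange 0 ((P.length : Nat) : Int) 1 := by
      rw [PySem.List.len_eq]
    have hcol := pv_col P S w hwpos hw' P.length le_rfl
    have hMlen : (M.length : Int) = w := by rw [hM, hn']; exact hcol.1
    have hMd : ∀ d : Int, 0 ≤ d → d < w → PySem.List.pyGetD M d 0 = ((pvMM P S d : Nat) : Int) := by
      intro d h0 h1
      rw [hM, hn']
      exact hcol.2 d h0 h1
    rw [PySem.List.foldl_ite_add_one, PySem.List.foldl_ite_add_one]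
    rw [zero_add, zero_add]
    rw [← PySem.List.map_pyGetD_pyRange_zero M 0]
    rw [show PySem.List.len M = w from by rw [PySem.List.len_eq]; exact hMlen]
    rw [List.countP_map]
    refine congrArg _ (List.countP_congr ?_)
    intro d hd
    rw [PySem.List.mem_pyRange_one] at hd
    simp only [Function.comp_apply, decide_eq_true_eq]
    rw [hMd d hd.1 hd.2]
    rw [PySem.List.len_eq]
    rw [pv_mism P S d hd.1 (by omega)]

-- ===== VERDICT (by name: the statement is the Claim_ definition above) =====
theorem count_ungapped_matches_py_spec : Claim_equal_count_ungapped_matches_py := by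
  intro primer subject max_mismatches _hdom
  unfold Spec_count_ungapped_matches_py
  exact pv_main primer subject max_mismatches
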